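-- pv_equiv track=rewrite | github.com/NikitaVolya/MathTree | MathTypes.py | OPERATOR_NAME_FILTER
-- ===== SOURCE A (Python) =====
-- def OPERATOR_NAME_FILTER(name: str) -> bool:
--     if '(' in name or ')' in name or '[' in name or ']' in name or \
--             '.' in name:
--         return True
--     for i in range(0, 10):
--         if str(i) in name:
--             return True
--     return False
-- ===== SOURCE B (Python) =====
-- _FORBIDDEN = set("()[].0123456789")
--
-- def OPERATOR_NAME_FILTER(name: str) -> bool:
--     return any(c in _FORBIDDEN for c in name)
-- ===== Notes on version B (the rewrite author's own statement) =====
-- stated objective: simpler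
-- what changed: Replaced five separate substring scans plus a ten-iteration digit loop (each scanning the whole string) with one single pass over the string testing each character against a precomputed forbidden-character set.
import Mathlib
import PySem

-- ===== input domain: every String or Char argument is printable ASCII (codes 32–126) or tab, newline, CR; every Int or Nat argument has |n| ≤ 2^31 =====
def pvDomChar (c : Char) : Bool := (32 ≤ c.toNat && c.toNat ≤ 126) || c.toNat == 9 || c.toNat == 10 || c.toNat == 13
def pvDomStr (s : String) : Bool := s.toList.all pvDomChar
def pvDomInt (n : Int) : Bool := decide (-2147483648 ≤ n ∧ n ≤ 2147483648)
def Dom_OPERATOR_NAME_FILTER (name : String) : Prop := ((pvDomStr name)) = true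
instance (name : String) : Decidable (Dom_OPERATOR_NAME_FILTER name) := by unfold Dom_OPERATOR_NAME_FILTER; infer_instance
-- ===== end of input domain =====

-- B replaces A's five substring scans and ten-iteration digit loop with one pass
-- over the string against a precomputed forbidden-character set (objective: simpler).

-- ===== PORT A =====
-- Literal port of A: five substring membership tests ('x' in name), then a loop
-- over range(0, 10) testing str(i) in name with early return (ported as `any`).
def OPERATOR_NAME_FILTER (name : String) : Bool :=
  if PySem.Str.isIn "(" name || PySem.Str.isIn ")" name || PySem.Str.isIn "[" name ||
      PySem.Str.isIn "]" name || PySem.Str.isIn "." name then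
    true
  else if (PySem.List.pyRange 0 10 1).any (fun i => PySem.Str.isIn (PySem.Int.toStr i) name) then
    true
  else
    false

-- ===== PORT B =====
-- B: a precomputed set of forbidden characters, then a single pass over the string.
def pvForbidden : PySem.Set Char := PySem.Set.ofList "()[].0123456789".toList

def OPERATOR_NAME_FILTER_alt (name : String) : Bool :=
  name.toList.any (fun c => PySem.Set.contains pvForbidden c)

-- ===== PRECONDITION & SPEC =====
def Spec_OPERATOR_NAME_FILTER (name : String) (out : Bool) : Prop := out = OPERATOR_NAME_FILTER_alt name
instance (name : String) (out : Bool) : Decidable (Spec_OPERATOR_NAME_FILTER name out) := by unfold Spec_OPERATOR_NAME_FILTER; infer_instance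

-- ===== CLAIM (what is proved, stated in full; the proofs are below) =====
def Claim_equal_OPERATOR_NAME_FILTER : Prop := ∀ (name : String), Dom_OPERATOR_NAME_FILTER name → Spec_OPERATOR_NAME_FILTER name (OPERATOR_NAME_FILTER name)

-- ===== LEMMAS AND PROOFS =====
-- A single-character substring is in a string iff the character occurs in it.
theorem pv_isIn_single (c : Char) (l : List Char) :
    PySem.Chars.isIn [c] l = l.contains c := by
  rw [Bool.eq_iff_iff, PySem.Chars.isIn_iff_infix, List.contains_iff_mem]
  constructor
  · intro h; exact h.sublist.subset (List.mem_cons_self ..)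
  · intro h
    obtain ⟨s, t, rfl⟩ := List.append_of_mem h
    exact ⟨s, t, by simp⟩

-- ===== VERDICT (by name: the statement is the Claim_ definition above) =====
theorem OPERATOR_NAME_FILTER_spec : Claim_equal_OPERATOR_NAME_FILTER := by
  intro name _
  unfold Spec_OPERATOR_NAME_FILTER OPERATOR_NAME_FILTER OPERATOR_NAME_FILTER_alt pvForbidden

  have hr : PySem.List.pyRange 0 10 1 = [0,1,2,3,4,5,6,7,8,9] := by decide
  have hf : PySem.Set.ofList "()[].0123456789".toList = "()[].0123456789".toList := by decide
  have h0 : PySem.Int.toStr 0 = "0" := by decide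
  have h1 : PySem.Int.toStr 1 = "1" := by decide
  have h2 : PySem.Int.toStr 2 = "2" := by decide
  have h3 : PySem.Int.toStr 3 = "3" := by decide
  have h4 : PySem.Int.toStr 4 = "4" := by decide
  have h5 : PySem.Int.toStr 5 = "5" := by decide
  have h6 : PySem.Int.toStr 6 = "6" := by decide
  have h7 : PySem.Int.toStr 7 = "7" := by decide
  have h8 : PySem.Int.toStr 8 = "8" := by decide
  have h9 : PySem.Int.toStr 9 = "9" := by decide
  rw [Bool.eq_iff_iff, hr, hf]
  simp only [List.any_cons, List.any_nil, h0,h1,h2,h3,h4,h5,h6,h7,h8,h9]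
  simp [pv_isIn_single]
  constructor
  · rintro (((((h|h)|h)|h)|h)|h|h|h|h|h|h|h|h|h|h) <;> exact ⟨_, h, by decide⟩
  · rintro ⟨x, hx, (rfl|rfl|rfl|rfl|rfl|rfl|rfl|rfl|rfl|rfl|rfl|rfl|rfl|rfl|rfl)⟩
    · exact Or.inl (Or.inl (Or.inl (Or.inl (Or.inl hx))))
    · exact Or.inl (Or.inl (Or.inl (Or.inl (Or.inr hx))))
    · exact Or.inl (Or.inl (Or.inl (Or.inr hx)))
    · exact Or.inl (Or.inl (Or.inr hx))
    · exact Or.inl (Or.inr hx)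
    · exact Or.inr (Or.inl hx)
    · exact Or.inr (Or.inr (Or.inl hx))
    · exact Or.inr (Or.inr (Or.inr (Or.inl hx)))
    · exact Or.inr (Or.inr (Or.inr (Or.inr (Or.inl hx))))
    · exact Or.inr (Or.inr (Or.inr (Or.inr (Or.inr (Or.inl hx)))))
    · exact Or.inr (Or.inr (Or.inr (Or.inr (Or.inr (Or.inr (Or.inl hx))))))
    · exact Or.inr (Or.inr (Or.inr (Or.inr (Or.inr (Or.inr (Or.inr (Or.inl hx)))))))
    · exact Or.inr (Or.inr (Or.inr (Or.inr (Or.inr (Or.inr (Or.inr (Or.inr (Or.inl hx))))))))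
    · exact Or.inr (Or.inr (Or.inr (Or.inr (Or.inr (Or.inr (Or.inr (Or.inr (Or.inr (Or.inl hx)))))))))
    · exact Or.inr (Or.inr (Or.inr (Or.inr (Or.inr (Or.inr (Or.inr (Or.inr (Or.inr (Or.inr hx)))))))))
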